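-- pv_equiv track=rewrite | github.com/tteofili/ellmer | ellmer/post_hoc/certa_triangles_method.py | find_diff_spans
-- ===== SOURCE A (Python) =====
-- def find_diff_spans(free_toks, support_toks, allowed_attributes=None, max_n=3):
--     """
--     Identify token spans (attr, start, n) where free differs from support,
--     only for allowed attributes.
--     """
--     allowed_attributes = allowed_attributes or list(free_toks.keys())
--     spans = []
--     for attr in allowed_attributes:
--         if attr not in free_toks or attr not in support_toks:
--             continue
--         f = free_toks[attr]
--         s = support_toks[attr]
--         max_len = max(len(f), len(s))
--         for i in range(max_len):
--             for n in range(1, max_n + 1):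
--                 if i + n > max_len:
--                     continue
--                 f_ngram = f[i:i+n]
--                 s_ngram = s[i:i+n]
--                 if f_ngram != s_ngram:
--                     spans.append((attr, i, n))
--     return spans
-- ===== SOURCE B (Python) =====
-- def find_diff_spans(free_toks, support_toks, allowed_attributes=None, max_n=3):
--     """
--     Same result as A, but instead of comparing n-gram slices (O(n) each),
--     precompute per-position diff flags and their prefix sums, so each
--     (i, n) query is an O(1) range-sum test.
--     """
--     allowed_attributes = allowed_attributes or list(free_toks.keys())
--     spans = []
--     for attr in allowed_attributes:
--         if attr not in free_toks or attr not in support_toks: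
--             continue
--         f = free_toks[attr]
--         s = support_toks[attr]
--         max_len = max(len(f), len(s))
--         # prefix[k] = number of positions j < k where f and s disagree
--         # (different token, or exactly one of the two lists has ended)
--         prefix = [0]
--         acc = 0
--         for j in range(max_len):
--             fj = f[j] if j < len(f) else None
--             sj = s[j] if j < len(s) else None
--             acc += (fj != sj)
--             prefix.append(acc)
--         for i in range(max_len):
--             # only spans that fit: n ≤ max_len - i (A skips the rest one by one)
--             for n in range(1, min(max_n, max_len - i) + 1):
--                 if prefix[i + n] > prefix[i]:
--                     spans.append((attr, i, n))
--     return spans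
-- ===== Notes on version B (the rewrite author's own statement) =====
-- stated objective: faster
-- what changed: B precomputes per-position diff flags and their prefix sums once per attribute, answers each (i, n) query with an O(1) prefix-sum range test instead of building and comparing two n-gram slices, and caps the inner n-loop at max_len - i instead of iterating all of range(1, max_n + 1) and skipping the out-of-range tail one by one.
import Mathlib
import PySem

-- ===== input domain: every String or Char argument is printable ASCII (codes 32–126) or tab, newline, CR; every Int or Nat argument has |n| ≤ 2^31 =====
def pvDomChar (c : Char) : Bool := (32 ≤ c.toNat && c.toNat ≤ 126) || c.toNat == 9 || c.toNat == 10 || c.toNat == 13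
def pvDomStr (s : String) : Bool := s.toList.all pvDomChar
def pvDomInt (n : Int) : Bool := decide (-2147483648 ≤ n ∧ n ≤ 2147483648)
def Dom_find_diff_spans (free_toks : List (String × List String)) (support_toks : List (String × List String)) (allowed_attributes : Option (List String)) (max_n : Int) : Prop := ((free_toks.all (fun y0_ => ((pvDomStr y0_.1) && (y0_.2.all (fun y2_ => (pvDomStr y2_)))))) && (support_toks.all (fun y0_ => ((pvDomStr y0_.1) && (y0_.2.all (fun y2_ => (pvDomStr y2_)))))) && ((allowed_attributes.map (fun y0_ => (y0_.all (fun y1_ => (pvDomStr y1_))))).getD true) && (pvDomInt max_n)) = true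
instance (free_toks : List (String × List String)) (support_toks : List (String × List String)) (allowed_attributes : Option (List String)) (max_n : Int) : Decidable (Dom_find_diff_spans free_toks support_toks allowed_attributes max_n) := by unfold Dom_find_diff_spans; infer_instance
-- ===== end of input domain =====

-- B replaces the per-(i, n) slice comparison by an O(1) prefix-sum range test over
-- precomputed per-position diff flags, and caps the n-range at max_len - i instead of
-- iterating all of range(1, max_n + 1) and skipping the out-of-range tail one by one.

-- ===== PORT A =====
-- 'allowed_attributes or list(free_toks.keys())' : both None and [] are falsy in Python
def pvAllowed (free_toks : List (String × List String)) (allowed_attributes : Option (List String)) : List String :=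
  match allowed_attributes with
  | none => (PySem.Dict.mk free_toks).keys
  | some l => if l = [] then (PySem.Dict.mk free_toks).keys else l

def find_diff_spans (free_toks : List (String × List String)) (support_toks : List (String × List String)) (allowed_attributes : Option (List String)) (max_n : Int) : List (String × Int × Int) :=
  let dFree := PySem.Dict.mk free_toks
  let dSup := PySem.Dict.mk support_toks
  (pvAllowed free_toks allowed_attributes).foldl (fun spans attr =>
    if !(dFree.contains attr) || !(dSup.contains attr) then spans
    else
      -- 'f = free_toks[attr]': the guard above makes the key present, so getD's default is unreachable
      let f := dFree.getD attr []
      let s := dSup.getD attr []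
      let max_len : Int := max (PySem.List.len f) (PySem.List.len s)
      (PySem.List.pyRange 0 max_len 1).foldl (fun spans i =>
        (PySem.List.pyRange 1 (max_n + 1) 1).foldl (fun spans n =>
          if i + n > max_len then spans
          else
            let f_ngram := PySem.List.slice f (some i) (some (i + n))
            let s_ngram := PySem.List.slice s (some i) (some (i + n))
            if f_ngram ≠ s_ngram then spans ++ [(attr, i, n)] else spans) spans) spans) []

-- ===== PORT B =====
-- one step of B's prefix-sum loop: state = (prefix list so far, running count acc)
def pvStep (f s : List String) (st : List Int × Int) (j : Int) : List Int × Int :=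
  let fj : Option String := if j < PySem.List.len f then PySem.List.pyGet? f j else none
  let sj : Option String := if j < PySem.List.len s then PySem.List.pyGet? s j else none
  let acc := st.2 + (if fj ≠ sj then 1 else 0)
  (st.1 ++ [acc], acc)

def find_diff_spans_alt (free_toks : List (String × List String)) (support_toks : List (String × List String)) (allowed_attributes : Option (List String)) (max_n : Int) : List (String × Int × Int) :=
  let dFree := PySem.Dict.mk free_toks
  let dSup := PySem.Dict.mk support_toks
  (pvAllowed free_toks allowed_attributes).foldl (fun spans attr =>
    if !(dFree.contains attr) || !(dSup.contains attr) then spans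
    else
      let f := dFree.getD attr []
      let s := dSup.getD attr []
      let max_len : Int := max (PySem.List.len f) (PySem.List.len s)
      -- prefix[k] = number of positions j < k where f and s disagree
      let pref := ((PySem.List.pyRange 0 max_len 1).foldl (pvStep f s) ([0], 0)).1
      (PySem.List.pyRange 0 max_len 1).foldl (fun spans i =>
        -- only spans that fit: n ≤ max_len - i (A skips the rest one by one)
        (PySem.List.pyRange 1 (min max_n (max_len - i) + 1) 1).foldl (fun spans n =>
          -- both prefix indices are provably in range here, so pyGetD's default is unreachable
          if PySem.List.pyGetD pref (i + n) 0 > PySem.List.pyGetD pref i 0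
            then spans ++ [(attr, i, n)] else spans) spans) spans) []

-- ===== PRECONDITION & SPEC =====
def Spec_find_diff_spans (free_toks : List (String × List String)) (support_toks : List (String × List String)) (allowed_attributes : Option (List String)) (max_n : Int) (out : List (String × Int × Int)) : Prop := out = find_diff_spans_alt free_toks support_toks allowed_attributes max_n
instance (free_toks : List (String × List String)) (support_toks : List (String × List String)) (allowed_attributes : Option (List String)) (max_n : Int) (out : List (String × Int × Int)) : Decidable (Spec_find_diff_spans free_toks support_toks allowed_attributes max_n out) := by unfold Spec_find_diff_spans; infer_instance

-- ===== CLAIM (what is proved, stated in full; the proofs are below) =====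
def Claim_equal_find_diff_spans : Prop := ∀ (free_toks : List (String × List String)) (support_toks : List (String × List String)) (allowed_attributes : Option (List String)) (max_n : Int), Dom_find_diff_spans free_toks support_toks allowed_attributes max_n → Spec_find_diff_spans free_toks support_toks allowed_attributes max_n (find_diff_spans free_toks support_toks allowed_attributes max_n)

-- ===== LEMMAS AND PROOFS =====

-- position j "differs": different token there, or exactly one of the lists has ended
def pvDiff (f s : List String) (j : Nat) : Bool := decide (f[j]? ≠ s[j]?)

-- number of differing positions below k
def pvCnt (f s : List String) (k : Nat) : Int := ((List.range k).countP (pvDiff f s) : Int)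

theorem pvCnt_succ (f s : List String) (m : Nat) :
    pvCnt f s (m + 1) = pvCnt f s m + (if f[m]? ≠ s[m]? then 1 else 0) := by
  simp only [pvCnt, List.range_succ, List.countP_append, List.countP_cons, List.countP_nil,
    pvDiff]
  by_cases h : f[m]? = s[m]? <;> simp [h]

-- B's prefix loop builds exactly the table of pvCnt values (and acc = pvCnt of the bound)
theorem pvStep_foldl (f s : List String) (m : Nat) :
    (PySem.List.pyRange 0 (m : Int) 1).foldl (pvStep f s) ([0], 0) =
      ((List.range (m + 1)).map (pvCnt f s), pvCnt f s m) := by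
  induction m with
  | zero => simp [PySem.List.pyRange_one_eq_nil, pvCnt]
  | succ m ih =>
    have hcast : ((m : Int) + 1) = ((m + 1 : Nat) : Int) := by push_cast; ring
    rw [show ((m + 1 : Nat) : Int) = (m : Int) + 1 by push_cast; ring,
      PySem.List.pyRange_one_succ_right (by positivity), List.foldl_append, ih]
    have hfj : (if (m : Int) < PySem.List.len f then PySem.List.pyGet? f (m : Int) else none)
        = f[m]? := by
      by_cases h : m < f.length
      · simp [PySem.List.len_eq, h]
      · simp [PySem.List.len_eq, h]
    have hsj : (if (m : Int) < PySem.List.len s then PySem.List.pyGet? s (m : Int) else none)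
        = s[m]? := by
      by_cases h : m < s.length
      · simp [PySem.List.len_eq, h]
      · simp [PySem.List.len_eq, h]
    simp only [List.foldl_cons, List.foldl_nil, pvStep, hfj, hsj]
    rw [← pvCnt_succ]
    simp [List.range_succ (n := m + 1)]

theorem pvPref_get (f s : List String) (m k : Nat) (hk : k ≤ m) :
    PySem.List.pyGetD ((List.range (m + 1)).map (pvCnt f s)) (k : Int) 0 = pvCnt f s k := by
  rw [PySem.List.pyGetD_natCast]
  exact PySem.List.getD_map_range (pvCnt f s) (m + 1) k 0 (by omega)

-- the range-sum test reads off existence of a differing position in [a, a+b)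
theorem pvCnt_lt_iff (f s : List String) (a b : Nat) :
    pvCnt f s a < pvCnt f s (a + b) ↔ ∃ k < b, f[a + k]? ≠ s[a + k]? := by
  simp only [pvCnt, List.range_add, List.countP_append, Int.lt_iff_add_one_le]
  constructor
  · intro h
    have hpos : 0 < ((List.range b).map (a + ·)).countP (pvDiff f s) := by omega
    obtain ⟨x, hx, hpx⟩ := List.countP_pos_iff.mp hpos
    obtain ⟨k, hk, rfl⟩ := List.mem_map.mp hx
    exact ⟨k, List.mem_range.mp hk, by simpa [pvDiff] using hpx⟩
  · intro ⟨k, hk, hne⟩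
    have hpos : 0 < ((List.range b).map (a + ·)).countP (pvDiff f s) :=
      List.countP_pos_iff.mpr ⟨a + k, List.mem_map.mpr ⟨k, List.mem_range.mpr hk, rfl⟩,
        by simpa [pvDiff] using hne⟩
    omega

-- A's slice comparison tests the same thing
theorem pvSlice_eq_iff (f s : List String) (a b : Nat) :
    (f.drop a).take b = (s.drop a).take b ↔ ∀ k < b, f[a + k]? = s[a + k]? := by
  constructor
  · intro h k hk
    have := congrArg (fun l => l[k]?) h
    simpa [List.getElem?_take_of_lt hk, List.getElem?_drop] using this
  · intro h
    apply List.ext_getElem?_iff.mpr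
    intro k
    by_cases hk : k < b
    · simpa [List.getElem?_take_of_lt hk, List.getElem?_drop] using h k hk
    · rw [List.getElem?_eq_none (l := (f.drop a).take b) (by simp [List.length_take]; omega),
        List.getElem?_eq_none (l := (s.drop a).take b) (by simp [List.length_take]; omega)]

-- the per-(i, n) conditions of the two ports agree on in-range indices
theorem pvCond_iff (f s : List String) (m : Nat) (i n : Int)
    (hi : 0 ≤ i) (hn : 0 ≤ n) (hub : i + n ≤ (m : Int)) :
    (PySem.List.slice f (some i) (some (i + n)) ≠ PySem.List.slice s (some i) (some (i + n)))
      ↔ PySem.List.pyGetD ((List.range (m + 1)).map (pvCnt f s)) i 0 <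
          PySem.List.pyGetD ((List.range (m + 1)).map (pvCnt f s)) (i + n) 0 := by
  obtain ⟨a, rfl⟩ := Int.eq_ofNat_of_zero_le hi
  obtain ⟨b, rfl⟩ := Int.eq_ofNat_of_zero_le hn
  have hab : a + b ≤ m := by exact_mod_cast hub
  rw [show ((a : Int) + (b : Int)) = ((a + b : Nat) : Int) by push_cast; ring]
  rw [pvPref_get f s m a (by omega), pvPref_get f s m (a + b) (by omega)]
  rw [show ((a + b : Nat) : Int) = ((a : Int) + (b : Int)) by push_cast; ring,
    PySem.List.slice_natCast_add, PySem.List.slice_natCast_add]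
  rw [pvCnt_lt_iff]
  constructor
  · intro hne
    by_contra hno
    simp only [not_exists] at hno
    exact hne ((pvSlice_eq_iff f s a b).mpr (by simpa using hno))
  · intro ⟨k, hk, hne⟩ heq
    exact hne ((pvSlice_eq_iff f s a b).mp heq k hk)

-- the two inner n-loops agree: A iterates n over [1, max_n] skipping n > m - i,
-- B iterates n over [1, min max_n (m - i)] with the prefix-sum test
theorem pvInner_eq (f s : List String) (m : Nat) (max_n i : Int) (attr : String)
    (hi0 : 0 ≤ i) (him : i < (m : Int)) (spans : List (String × Int × Int)) :
    (PySem.List.pyRange 1 (max_n + 1) 1).foldl (fun spans n =>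
        if i + n > (m : Int) then spans
        else
          let f_ngram := PySem.List.slice f (some i) (some (i + n))
          let s_ngram := PySem.List.slice s (some i) (some (i + n))
          if f_ngram ≠ s_ngram then spans ++ [(attr, i, n)] else spans) spans
      = (PySem.List.pyRange 1 (min max_n ((m : Int) - i) + 1) 1).foldl (fun spans n =>
          if PySem.List.pyGetD ((List.range (m + 1)).map (pvCnt f s)) (i + n) 0 >
              PySem.List.pyGetD ((List.range (m + 1)).map (pvCnt f s)) i 0
            then spans ++ [(attr, i, n)] else spans) spans := by
  by_cases hpos : 1 ≤ max_n
  · have hsplit := PySem.List.pyRange_one_append 1 (min max_n ((m : Int) - i) + 1)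
      (max_n + 1) (by omega) (by omega)
    rw [hsplit, List.foldl_append]
    have htail : ∀ acc, (PySem.List.pyRange (min max_n ((m : Int) - i) + 1) (max_n + 1) 1).foldl
        (fun spans n =>
          if i + n > (m : Int) then spans
          else
            let f_ngram := PySem.List.slice f (some i) (some (i + n))
            let s_ngram := PySem.List.slice s (some i) (some (i + n))
            if f_ngram ≠ s_ngram then spans ++ [(attr, i, n)] else spans) acc = acc := by
      intro acc
      refine Eq.trans (PySem.List.foldl_congr_mem _ _ _ _ ?_)
        (PySem.List.foldl_ignore _ _)
      intro acc' n hn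
      obtain ⟨h1, h2⟩ := PySem.List.mem_pyRange_one.mp hn
      exact if_pos (by omega : i + n > (m : Int))
    rw [htail]
    apply PySem.List.foldl_congr_mem
    intro acc n hn
    obtain ⟨h1, h2⟩ := PySem.List.mem_pyRange_one.mp hn
    have hub : i + n ≤ (m : Int) := by omega
    have hcond := pvCond_iff f s m i n hi0 (by omega) hub
    rw [if_neg (not_lt.mpr hub)]
    split_ifs with hpref
    · show (if PySem.List.slice f (some i) (some (i + n)) ≠ PySem.List.slice s (some i) (some (i + n))
          then acc ++ [(attr, i, n)] else acc) = acc ++ [(attr, i, n)]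
      exact if_pos (hcond.mpr hpref)
    · show (if PySem.List.slice f (some i) (some (i + n)) ≠ PySem.List.slice s (some i) (some (i + n))
          then acc ++ [(attr, i, n)] else acc) = acc
      exact if_neg (fun hne => hpref (hcond.mp hne))
  · rw [PySem.List.pyRange_one_eq_nil (by omega), PySem.List.pyRange_one_eq_nil (by omega)]
    rfl

-- ===== VERDICT (by name: the statement is the Claim_ definition above) =====
theorem find_diff_spans_spec : Claim_equal_find_diff_spans := by
  intro free_toks support_toks allowed_attributes max_n _
  unfold Spec_find_diff_spans find_diff_spans find_diff_spans_alt
  apply PySem.List.foldl_congr_mem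
  intro spans attr _
  by_cases hguard : (!((PySem.Dict.mk free_toks).contains attr) ||
      !((PySem.Dict.mk support_toks).contains attr)) = true
  · simp only [hguard, if_true]
  · simp only [hguard]
    set f := (PySem.Dict.mk free_toks).getD attr [] with hf
    set s := (PySem.Dict.mk support_toks).getD attr [] with hs
    set m : Nat := max f.length s.length with hm
    have hml : max (PySem.List.len f) (PySem.List.len s) = (m : Int) := by
      simp only [PySem.List.len_eq, hm]; omega
    rw [hml, pvStep_foldl]
    apply PySem.List.foldl_congr_mem
    intro spans₁ i hi
    obtain ⟨hi0, him⟩ := (PySem.List.mem_pyRange_one).mp hi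
    exact pvInner_eq f s m max_n i attr hi0 him spans₁
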